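-- pv_equiv track=rewrite | github.com/anishvkalbhor/DSA-with-Python | Coding_exercise/hollow_triangle.py | generate_hollow_right_angled_triangle
-- ===== SOURCE A (Python) =====
-- def generate_hollow_right_angled_triangle(n):
--     """
--     Function to return a hollow right-angled triangle of '*' of side n as a list of strings.
--
--     Parameters:
--     n (int): The height of the triangle.
--
--     Returns:
--     list: A list of strings where each string represents a row of the triangle.
--     """
--     # Your code here
--     traingle = []
--     if n == 0:
--         return []
--     elif n == 1:
--         return ['*']
--     else:
--         traingle.append('*' * n)
--         for i in range(1, n-1):
--             traingle.append('*' + ' ' * (n-2) + '*')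
--         traingle.append('*' * n)
--         return traingle
-- ===== SOURCE B (Python) =====
-- def generate_hollow_right_angled_triangle(n):
--     grid = [[' '] * n for _ in range(n)]
--     if n > 0:
--         grid[0] = ['*'] * n
--         grid[-1] = ['*'] * n
--         for row in grid:
--             row[0] = '*'
--             row[-1] = '*'
--     return [''.join(row) for row in grid]
-- ===== Notes on version B (the rewrite author's own statement) =====
-- stated objective: alternative
-- what changed: Replaces A's precomputed-row assembly (special cases plus appending full and star-space-star row strings) with a paint-on-canvas algorithm: build an n-by-n character grid of spaces, overwrite the top and bottom rows with stars, stamp a star into the first and last cell of every row, then join each row.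
-- intended difference: For negative n A returns ['',''] (its unconditional top/bottom appends of the '*'-repetition, which is empty for a negative count), while B returns [], the intended empty figure for a negative height. — e.g. on generate_hollow_right_angled_triangle(-1): A returns ["", ""], B returns []
import Mathlib
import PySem

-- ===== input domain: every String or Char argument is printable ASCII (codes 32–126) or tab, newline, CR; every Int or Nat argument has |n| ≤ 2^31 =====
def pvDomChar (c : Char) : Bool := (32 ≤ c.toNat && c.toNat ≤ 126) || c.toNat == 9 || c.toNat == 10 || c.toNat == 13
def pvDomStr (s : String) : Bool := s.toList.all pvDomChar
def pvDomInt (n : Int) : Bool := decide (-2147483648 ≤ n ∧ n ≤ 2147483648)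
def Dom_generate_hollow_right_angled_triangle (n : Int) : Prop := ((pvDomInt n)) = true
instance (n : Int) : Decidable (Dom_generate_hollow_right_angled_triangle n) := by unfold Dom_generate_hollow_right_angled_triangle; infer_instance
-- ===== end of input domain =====

-- B replaces A's precomputed-row assembly with a paint-on-canvas algorithm: an n×n grid
-- of spaces is built, the top and bottom rows are overwritten with stars, a star is
-- stamped into the first and last cell of every row, and the rows are joined
-- (alternative; same cost). For n < 0, A returns ['',''] and B returns [], stated as
-- the intended difference D_ below.

-- ===== PORT A =====
-- '*' * n and string concatenation are ported on the character-list level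
-- (String.ofList of PySem.List.pyRepeat / ++), exact: Python string repetition with a
-- negative count is '' and concatenation is append of the code points.
def generate_hollow_right_angled_triangle (n : Int) : List String :=
  let traingle : List String := []
  if n = 0 then []
  else if n = 1 then ["*"]
  else
    let traingle := traingle ++ [String.ofList (PySem.List.pyRepeat ['*'] n)]
    let traingle := (PySem.List.pyRange 1 (n - 1) 1).foldl
      (fun acc _i => acc ++ [String.ofList (['*'] ++ PySem.List.pyRepeat [' '] (n - 2) ++ ['*'])])
      traingle
    traingle ++ [String.ofList (PySem.List.pyRepeat ['*'] n)]

-- ===== PORT B =====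
-- Rows are lists of one-character strings in the Python, i.e. lists of Chars here;
-- ''.join(row) is String.ofList. grid[-1] and row[-1] occur only under the n > 0 guard,
-- where grid and every row are nonempty, so the negative index resolves to the last
-- element: ported as List.set at (length - 1), exact there. The mutating
-- 'for row in grid' loop becomes a map over the rows.
def generate_hollow_right_angled_triangle_alt (n : Int) : List String :=
  let grid := (PySem.List.pyRange 0 n 1).map (fun _ => PySem.List.pyRepeat [' '] n)
  let grid :=
    if 0 < n then
      let grid := grid.set 0 (PySem.List.pyRepeat ['*'] n)
      let grid := grid.set (grid.length - 1) (PySem.List.pyRepeat ['*'] n)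
      grid.map (fun row => ((row.set 0 '*').set (row.length - 1) '*'))
    else grid
  grid.map String.ofList

-- ===== PRECONDITION & SPEC =====
-- For negative n A returns ['',''] (its unconditional top/bottom appends of the
-- '*'-repetition, empty for a negative count), while B returns [], the intended empty
-- figure for a negative height.
def D_generate_hollow_right_angled_triangle (n : Int) : Prop := n < 0
instance (n : Int) : Decidable (D_generate_hollow_right_angled_triangle n) := by unfold D_generate_hollow_right_angled_triangle; infer_instance
def Spec_generate_hollow_right_angled_triangle (n : Int) (out : List String) : Prop := ¬ D_generate_hollow_right_angled_triangle n → out = generate_hollow_right_angled_triangle_alt n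
instance (n : Int) (out : List String) : Decidable (Spec_generate_hollow_right_angled_triangle n out) := by unfold Spec_generate_hollow_right_angled_triangle; infer_instance
def pvDiffWitness_generate_hollow_right_angled_triangle : Int := (-1)
def pvDiffWitnessOut_generate_hollow_right_angled_triangle : (List String) × (List String) := (["", ""], [])

-- ===== CLAIM (what is proved, stated in full; the proofs are below) =====
def Claim_unchanged_generate_hollow_right_angled_triangle : Prop := ∀ (n : Int), Dom_generate_hollow_right_angled_triangle n → Spec_generate_hollow_right_angled_triangle n (generate_hollow_right_angled_triangle n)
def Claim_changed_generate_hollow_right_angled_triangle : Prop := Dom_generate_hollow_right_angled_triangle (pvDiffWitness_generate_hollow_right_angled_triangle) ∧ D_generate_hollow_right_angled_triangle (pvDiffWitness_generate_hollow_right_angled_triangle) ∧ generate_hollow_right_angled_triangle (pvDiffWitness_generate_hollow_right_angled_triangle) = pvDiffWitnessOut_generate_hollow_right_angled_triangle.1 ∧ generate_hollow_right_angled_triangle_alt (pvDiffWitness_generate_hollow_right_angled_triangle) = pvDiffWitnessOut_generate_hollow_right_angled_triangle.2 ∧ pvDiffWitnessOut_generate_hollow_right_angled_triangle.1 ≠ 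pvDiffWitnessOut_generate_hollow_right_angled_triangle.2
def Claim_exact_generate_hollow_right_angled_triangle : Prop := ∀ (n : Int), Dom_generate_hollow_right_angled_triangle n → D_generate_hollow_right_angled_triangle n → generate_hollow_right_angled_triangle n ≠ generate_hollow_right_angled_triangle_alt n

-- ===== LEMMAS AND PROOFS =====

-- character-level rows used only by the proofs
def pvStarChars (m : Nat) : List Char := List.replicate m '*'
def pvMidChars (m : Nat) : List Char := '*' :: (List.replicate (m - 2) ' ' ++ ['*'])

theorem pv_A_val (m : Nat) (hm : 2 ≤ m) :
    generate_hollow_right_angled_triangle (m : Int)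
      = String.ofList (pvStarChars m)
          :: (List.replicate (m - 2) (String.ofList (pvMidChars m))
              ++ [String.ofList (pvStarChars m)]) := by
  unfold generate_hollow_right_angled_triangle
  rw [if_neg (by omega : ¬((m : Int) = 0)), if_neg (by omega : ¬((m : Int) = 1))]
  simp only []
  rw [PySem.List.foldl_append_singleton_eq_map, List.map_const', PySem.List.length_pyRange_one,
    PySem.List.pyRepeat_singleton, PySem.List.pyRepeat_singleton]
  have h1 : ((m : Int)).toNat = m := by omega
  have h2 : ((m : Int) - 1 - 1).toNat = m - 2 := by omega
  have h3 : ((m : Int) - 2).toNat = m - 2 := by omega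
  rw [h1, h2, h3]
  simp [pvStarChars, pvMidChars]

-- stamping the endpoints of the all-star row leaves it unchanged
theorem pv_stamp_star (m : Nat) :
    ((pvStarChars m).set 0 '*').set ((pvStarChars m).length - 1) '*' = pvStarChars m := by
  apply List.ext_getElem
  · simp
  intro i h1 h2
  simp [pvStarChars]

-- stamping the endpoints of the all-space row yields the hollow middle row
theorem pv_stamp_space (m : Nat) (hm : 2 ≤ m) :
    (((List.replicate m ' ').set 0 '*').set ((List.replicate m ' ' : List Char).length - 1) '*')
      = pvMidChars m := by
  apply List.ext_getElem
  · simp [pvMidChars]; omega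
  intro i h1 h2
  simp only [List.length_set, List.length_replicate] at h1
  simp only [List.getElem_set, List.length_replicate, List.getElem_replicate]
  unfold pvMidChars
  rcases i with _ | t
  · simp
  · rw [List.getElem_cons_succ]
    by_cases ht : t < m - 2
    · rw [List.getElem_append_left (by simpa using ht), List.getElem_replicate]
      have : ¬ (m - 1 = t + 1) := by omega
      simp [this]
    · rw [List.getElem_append_right (by simpa using ht)]
      have : m - 1 = t + 1 := by omega
      simp [this]

theorem pv_B_val (m : Nat) (hm : 2 ≤ m) :
    generate_hollow_right_angled_triangle_alt (m : Int)
      = String.ofList (pvStarChars m)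
          :: (List.replicate (m - 2) (String.ofList (pvMidChars m))
              ++ [String.ofList (pvStarChars m)]) := by
  unfold generate_hollow_right_angled_triangle_alt
  simp only [PySem.List.pyRange_zero_natCast, List.map_map]
  rw [if_pos (by omega : (0:Int) < (m : Int))]
  have h1 : ((m : Int)).toNat = m := by omega
  have hrep : (List.range m).map ((fun _ => PySem.List.pyRepeat [' '] (m : Int)) ∘ (fun k : Nat => (k : Int)))
      = List.replicate m (List.replicate m ' ') := by
    have hc : ((fun _ => PySem.List.pyRepeat [' '] (m : Int)) ∘ (fun k : Nat => (k : Int)))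
        = fun _ : Nat => PySem.List.pyRepeat [' '] (m : Int) := rfl
    rw [hc, List.map_const', List.length_range, PySem.List.pyRepeat_singleton, h1]
  rw [hrep, PySem.List.pyRepeat_singleton, h1]
  -- the grid after the two row overwrites
  have hgrid : ((List.replicate m (List.replicate m ' ')).set 0 (List.replicate m '*')).set
        (((List.replicate m (List.replicate m ' ')).set 0 (List.replicate m '*')).length - 1)
        (List.replicate m '*')
      = pvStarChars m :: (List.replicate (m - 2) (List.replicate m ' ') ++ [pvStarChars m]) := by
    apply List.ext_getElem
    · simp [pvStarChars]; omega
    intro i hA hB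
    simp only [List.length_set, List.length_replicate] at hA
    simp only [List.getElem_set, List.length_set, List.length_replicate, List.getElem_replicate]
    rcases i with _ | t
    · rw [List.getElem_cons_zero]
      have : ¬ (m - 1 = 0) := by omega
      simp [this, pvStarChars]
    · rw [List.getElem_cons_succ]
      by_cases ht : t < m - 2
      · rw [List.getElem_append_left (by simpa using ht), List.getElem_replicate]
        have : ¬ (m - 1 = t + 1) := by omega
        simp [this]
      · rw [List.getElem_append_right (by simpa using ht)]
        have : m - 1 = t + 1 := by omega
        simp [this, pvStarChars]
  rw [hgrid]
  simp only [List.map_cons, List.map_append, List.map_replicate, List.map_nil,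
    pv_stamp_star, pv_stamp_space m hm]

theorem hollow_A_neg (n : Int) (h : n < 0) :
    generate_hollow_right_angled_triangle n = ["", ""] := by
  unfold generate_hollow_right_angled_triangle
  rw [if_neg (by omega : ¬(n = 0)), if_neg (by omega : ¬(n = 1))]
  simp only []
  rw [PySem.List.pyRange_one_eq_nil (by omega)]
  have h0 : n.toNat = 0 := by omega
  simp [PySem.List.pyRepeat_singleton, h0]

theorem hollow_B_neg (n : Int) (h : n < 0) :
    generate_hollow_right_angled_triangle_alt n = [] := by
  unfold generate_hollow_right_angled_triangle_alt
  rw [PySem.List.pyRange_one_eq_nil (by omega)]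
  simp

theorem hollow_eq_nonneg (n : Int) (h : 0 ≤ n) :
    generate_hollow_right_angled_triangle n = generate_hollow_right_angled_triangle_alt n := by
  lift n to ℕ using h with m
  rcases m with _ | _ | k
  · decide
  · decide
  · rw [pv_A_val _ (by omega), pv_B_val _ (by omega)]

-- ===== VERDICT (by name: the statement is the Claim_ definition above) =====
theorem generate_hollow_right_angled_triangle_spec : Claim_unchanged_generate_hollow_right_angled_triangle := by
  intro n _ hnd
  exact (hollow_eq_nonneg n (by unfold D_generate_hollow_right_angled_triangle at hnd; omega)).symm ▸ rfl

theorem generate_hollow_right_angled_triangle_changed : Claim_changed_generate_hollow_right_angled_triangle := by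
  unfold Claim_changed_generate_hollow_right_angled_triangle; decide

theorem generate_hollow_right_angled_triangle_tight : Claim_exact_generate_hollow_right_angled_triangle := by
  intro n _ hd
  unfold D_generate_hollow_right_angled_triangle at hd
  rw [hollow_A_neg n hd, hollow_B_neg n hd]
  simp
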